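-- pv_equiv track=rewrite | github.com/umbum/Algorithm | kakao_blind2018/7.block_game.py | fillBlack
-- ===== SOURCE A (Python) =====
-- black = 1000
--
-- transpose = lambda data: [[row[i] for row in data] for i in range(len(data[0]))]
--
-- def fillBlack(board):
--     transposed = transpose(board)
--     for i, row in enumerate(transposed):
--         for j, x in enumerate(row):
--             if (x == 0):
--                 transposed[i][j] = black
--             else:
--                 break
--     return transpose(transposed)
-- ===== SOURCE B (Python) =====
-- black = 1000
--
-- def fillBlack(board):
--     ncols = len(board[0])
--     open_cols = [True] * ncols
--     result = []
--     for row in board: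
--         new_row = []
--         for j in range(ncols):
--             x = row[j]
--             if open_cols[j] and x == 0:
--                 new_row.append(black)
--             else:
--                 open_cols[j] = False
--                 new_row.append(x)
--         result.append(new_row)
--     return result
-- ===== Notes on version B (the rewrite author's own statement) =====
-- stated objective: alternative
-- what changed: Replaced A's transpose / per-column fill-with-break / transpose-back with a single row-major pass that keeps a per-column boolean mask of columns still in their leading-zero run.
import Mathlib
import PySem

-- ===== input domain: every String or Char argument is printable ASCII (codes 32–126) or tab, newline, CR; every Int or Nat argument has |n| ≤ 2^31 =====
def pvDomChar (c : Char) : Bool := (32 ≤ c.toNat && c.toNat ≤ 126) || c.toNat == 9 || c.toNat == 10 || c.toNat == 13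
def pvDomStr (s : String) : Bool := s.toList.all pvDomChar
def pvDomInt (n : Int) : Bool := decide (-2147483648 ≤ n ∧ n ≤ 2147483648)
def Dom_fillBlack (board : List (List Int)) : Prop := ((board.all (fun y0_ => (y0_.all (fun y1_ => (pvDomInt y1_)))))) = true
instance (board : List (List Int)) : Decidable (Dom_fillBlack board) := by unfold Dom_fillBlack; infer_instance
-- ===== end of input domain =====

-- B replaces A's transpose/fill/transpose with a single row-major pass keeping a per-column
-- "still leading zeros" mask; objective: alternative (no transposes, one pass over the grid).

-- ===== PORT A =====
def pvBlack : Int := 1000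

-- transpose = lambda data: [[row[i] for row in data] for i in range(len(data[0]))]
-- (row[i] is in range on every input admitted by Pre_; getD 0 is the total rendering)
def pyTranspose (data : List (List Int)) : List (List Int) :=
  (List.range (data.headD []).length).map (fun i => data.map (fun row => row.getD i 0))

-- inner loop of A over one transposed row: overwrite leading zeros, break at first nonzero
def fillRowA : List Int → List Int
  | [] => []
  | x :: xs => if x = 0 then pvBlack :: fillRowA xs else x :: xs

def fillBlack (board : List (List Int)) : List (List Int) :=
  pyTranspose ((pyTranspose board).map fillRowA)

-- ===== PORT B =====
-- inner loop of B over one row, paired with the column mask (len row ≥ len mask under Pre_):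
-- returns (new_row, updated open_cols)
def rowStepB : List Bool → List Int → List Int × List Bool
  | [], _ => ([], [])
  | _ :: _, [] => ([], [])   -- unreachable under Pre_ (row shorter than mask = Python IndexError)
  | b :: bs, x :: xs =>
      let p := rowStepB bs xs
      if b && x == 0 then (pvBlack :: p.1, true :: p.2)
      else (x :: p.1, false :: p.2)

def loopB : List Bool → List (List Int) → List (List Int)
  | _, [] => []
  | mask, row :: rest =>
      let p := rowStepB mask row
      p.1 :: loopB p.2 rest

def fillBlack_alt (board : List (List Int)) : List (List Int) :=
  loopB (List.replicate (board.headD []).length true) board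

-- ===== PRECONDITION & SPEC =====
-- Pre_ is exactly where the Python A returns: A raises IndexError on the empty board and on an
-- empty first row (transpose indexes data[0], and the second transpose of [] indexes [][0]),
-- and on any row shorter than the first row (row[i] out of range).
def Pre_fillBlack (board : List (List Int)) : Prop :=
  board ≠ [] ∧ 0 < (board.headD []).length ∧
    ∀ row ∈ board, (board.headD []).length ≤ row.length

instance (board : List (List Int)) : Decidable (Pre_fillBlack board) := by
  unfold Pre_fillBlack; infer_instance

def pvWitness_fillBlack : List (List Int) := [[0, 1], [2, 0]]

def Spec_fillBlack (board : List (List Int)) (out : List (List Int)) : Prop := out = fillBlack_alt board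
instance (board : List (List Int)) (out : List (List Int)) : Decidable (Spec_fillBlack board out) := by unfold Spec_fillBlack; infer_instance

-- ===== CLAIM (what is proved, stated in full; the proofs are below) =====
def Claim_equal_fillBlack : Prop := ∀ (board : List (List Int)), Dom_fillBlack board → Pre_fillBlack board → Spec_fillBlack board (fillBlack board)

-- ===== LEMMAS AND PROOFS =====

theorem fillRowA_length (l : List Int) : (fillRowA l).length = l.length := by
  induction l with
  | nil => rfl
  | cons x xs ih => simp only [fillRowA]; split <;> simp [ih]

-- entry i of A's filled column: black iff the whole prefix up to i is zero
theorem fillRowA_getD (l : List Int) (i : Nat) (hi : i < l.length) :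
    (fillRowA l).getD i 0 =
      if ((l.take (i+1)).all (fun x => x == 0)) = true then pvBlack else l.getD i 0 := by
  induction l generalizing i with
  | nil => simp at hi
  | cons x xs ih =>
    simp only [fillRowA]
    by_cases hx : x = 0
    · subst hx
      cases i with
      | zero => simp
      | succ k =>
        have hk : k < xs.length := by simpa using hi
        simpa using ih k hk
    · rw [if_neg hx]
      cases i with
      | zero => simp [hx]
      | succ k => simp [hx]

theorem rowStepB_eq (m : List Bool) (row : List Int) (h : m.length ≤ row.length) :
    rowStepB m row =
      ((List.range m.length).map (fun j =>
          if (m.getD j false && (row.getD j 0 == 0)) = true then pvBlack else row.getD j 0),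
       (List.range m.length).map (fun j => m.getD j false && (row.getD j 0 == 0))) := by
  induction m generalizing row with
  | nil => simp [rowStepB]
  | cons b bs ih =>
    cases row with
    | nil => simp at h
    | cons x xs =>
      have h' : bs.length ≤ xs.length := by simpa using h
      simp only [rowStepB, ih xs h', List.length_cons, List.range_succ_eq_map,
        List.map_cons, List.map_map]
      by_cases hb : (b && x == 0) = true
      · rw [if_pos hb]
        refine Prod.ext ?_ ?_ <;> simp [hb, Function.comp]
      · rw [if_neg hb]
        have hb' : (b && x == 0) = false := by simpa using hb
        refine Prod.ext ?_ ?_ <;> simp [hb', Function.comp]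

-- characterisation of B's row loop: entry (i, j) is black iff the mask bit j is set and
-- column j is zero in all rows up to i
theorem loopB_eq (rows : List (List Int)) (m : List Bool)
    (h : ∀ row ∈ rows, m.length ≤ row.length) :
    loopB m rows =
      (List.range rows.length).map (fun i =>
        (List.range m.length).map (fun j =>
          if (m.getD j false &&
               ((rows.take (i+1)).map (fun row => row.getD j 0)).all (fun x => x == 0)) = true
          then pvBlack else (rows.getD i []).getD j 0)) := by
  induction rows generalizing m with
  | nil => simp [loopB]
  | cons row rest ih =>
    have hrow : m.length ≤ row.length := h row (by simp)
    have hrest : ∀ r ∈ rest, m.length ≤ r.length := fun r hr => h r (by simp [hr])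
    have hlen : ((List.range m.length).map
        (fun j => m.getD j false && (row.getD j 0 == 0))).length = m.length := by simp
    simp only [loopB, rowStepB_eq m row hrow]
    rw [ih _ (by intro r hr; rw [hlen]; exact hrest r hr)]
    simp only [List.length_cons, List.range_succ_eq_map, List.map_cons, List.map_map, hlen]
    congr 1
    · -- first output row
      apply List.map_congr_left
      intro j hj
      simp
    · -- remaining rows
      apply List.map_congr_left
      intro i hi
      apply List.map_congr_left
      intro j hj
      have hj' : j < m.length := List.mem_range.mp hj
      have hget : ((List.range m.length).map
          (fun j => m.getD j false && (row.getD j 0 == 0))).getD j false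
          = (m.getD j false && (row.getD j 0 == 0)) := by
        rw [List.getD_eq_getElem?_getD]
        simp [hj']
      rw [hget]
      simp [List.all_cons, Bool.and_assoc]

theorem getD_map_col (board : List (List Int)) (i : Nat) (j : Nat) (hi : i < board.length) :
    (board.map (fun row => row.getD j 0)).getD i 0 = (board.getD i []).getD j 0 := by
  rw [List.getD_eq_getElem?_getD, List.getD_eq_getElem?_getD, List.getElem?_map]
  simp [List.getElem?_eq_getElem hi]

-- A in the same normal form
theorem fillBlack_normal (board : List (List Int)) (hc : 0 < (board.headD []).length) :
    fillBlack board =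
      (List.range board.length).map (fun i =>
        (List.range (board.headD []).length).map (fun j =>
          if (((board.take (i+1)).map (fun row => row.getD j 0)).all (fun x => x == 0)) = true
          then pvBlack else (board.getD i []).getD j 0)) := by
  set c := (board.headD []).length with hcdef
  have hT : pyTranspose board =
      (List.range c).map (fun j => board.map (fun row => row.getD j 0)) := rfl
  have hX : (pyTranspose board).map fillRowA =
      (List.range c).map (fun j => fillRowA (board.map (fun row => row.getD j 0))) := by
    rw [hT, List.map_map]; rfl
  have hhead : (((pyTranspose board).map fillRowA).headD []).length = board.length := by
    rw [hX]
    obtain ⟨c', hc'⟩ : ∃ c', c = c' + 1 := ⟨c - 1, by omega⟩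
    rw [hc', List.range_succ_eq_map]
    simp [fillRowA_length]
  unfold fillBlack
  rw [pyTranspose]
  rw [hhead, hX]
  apply List.map_congr_left
  intro i hi
  have hi' : i < board.length := List.mem_range.mp hi
  rw [List.map_map]
  apply List.map_congr_left
  intro j hj
  have hlencol : i < (board.map (fun row => row.getD j 0)).length := by simpa using hi'
  simp only [Function.comp]
  rw [fillRowA_getD _ i hlencol, ← List.map_take, getD_map_col _ _ _ hi']

-- ===== VERDICT (by name: the statement is the Claim_ definition above) =====
theorem fillBlack_spec : Claim_equal_fillBlack := by
  intro board _ hpre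
  obtain ⟨hne, hc, hlen⟩ := hpre
  unfold Spec_fillBlack fillBlack_alt
  rw [fillBlack_normal board hc,
      loopB_eq board (List.replicate (board.headD []).length true)
        (by intro r hr; simpa using hlen r hr)]
  simp only [List.length_replicate]
  apply List.map_congr_left
  intro i hi
  apply List.map_congr_left
  intro j hj
  have hj' : j < (board.headD []).length := List.mem_range.mp hj
  have hmask : (List.replicate (board.headD []).length true).getD j false = true := by
    rw [List.getD_eq_getElem?_getD, List.getElem?_replicate, if_pos hj']; rfl
  rw [hmask, Bool.true_and]
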